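-- pv_equiv track=rewrite | github.com/pypi-data/pypi-mirror-370 | packages/subprocess-vcr/subprocess_vcr-0.1.0-py3-none-any.whl/subprocess_vcr/core.py | _find_command_differences
-- ===== SOURCE A (Python) =====
-- def _find_command_differences(cmd1: list[str], cmd2: list[str]) -> list[str]:
--     """Find differences between two commands.
--
--     Returns:
--         List of difference descriptions
--     """
--     __tracebackhide__ = True
--     differences = []
--
--     if len(cmd1) != len(cmd2):
--         differences.append(f"Length: {len(cmd1)} != {len(cmd2)}")
--         # Still compare what we can
--         min_len = min(len(cmd1), len(cmd2))
--         for i in range(min_len):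
--             if cmd1[i] != cmd2[i]:
--                 differences.append(f"Argument {i}: {repr(cmd1[i])} != {repr(cmd2[i])}")
--         # Note extra arguments
--         if len(cmd1) > len(cmd2):
--             for i in range(len(cmd2), len(cmd1)):
--                 differences.append(f"Argument {i}: {repr(cmd1[i])} (extra in actual)")
--         else:
--             for i in range(len(cmd1), len(cmd2)):
--                 differences.append(
--                     f"Argument {i}: {repr(cmd2[i])} (missing from actual)"
--                 )
--     else:
--         # Same length, find differences
--         for i in range(len(cmd1)):
--             if cmd1[i] != cmd2[i]:
--                 differences.append(f"Argument {i}: {repr(cmd1[i])} != {repr(cmd2[i])}")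
--
--     return differences
-- ===== SOURCE B (Python) =====
-- _PAD = object()  # unique sentinel: can never equal a genuine argument string
--
-- def _find_command_differences(cmd1: list[str], cmd2: list[str]) -> list[str]:
--     """Sentinel-padded co-iteration of both lists; no indexing, no range loops."""
--
--     def pad_pairs(xs, ys):
--         it1, it2 = iter(xs), iter(ys)
--         while True:
--             a = next(it1, _PAD)
--             b = next(it2, _PAD)
--             if a is _PAD and b is _PAD:
--                 return
--             yield a, b
--
--     diffs = []
--     if len(cmd1) != len(cmd2):
--         diffs.append(f"Length: {len(cmd1)} != {len(cmd2)}")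
--     for i, (a, b) in enumerate(pad_pairs(cmd1, cmd2)):
--         if b is _PAD:
--             diffs.append(f"Argument {i}: {a!r} (extra in actual)")
--         elif a is _PAD:
--             diffs.append(f"Argument {i}: {b!r} (missing from actual)")
--         elif a != b:
--             diffs.append(f"Argument {i}: {a!r} != {b!r}")
--     return diffs
-- ===== Notes on version B (the rewrite author's own statement) =====
-- stated objective: alternative
-- what changed: Replaced A's length branch plus three separate index-range loops by a sentinel-padded co-iteration of both lists (a hand-rolled zip_longest generator) with one classifying pass; no list indexing or range() at all.
import Mathlib
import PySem

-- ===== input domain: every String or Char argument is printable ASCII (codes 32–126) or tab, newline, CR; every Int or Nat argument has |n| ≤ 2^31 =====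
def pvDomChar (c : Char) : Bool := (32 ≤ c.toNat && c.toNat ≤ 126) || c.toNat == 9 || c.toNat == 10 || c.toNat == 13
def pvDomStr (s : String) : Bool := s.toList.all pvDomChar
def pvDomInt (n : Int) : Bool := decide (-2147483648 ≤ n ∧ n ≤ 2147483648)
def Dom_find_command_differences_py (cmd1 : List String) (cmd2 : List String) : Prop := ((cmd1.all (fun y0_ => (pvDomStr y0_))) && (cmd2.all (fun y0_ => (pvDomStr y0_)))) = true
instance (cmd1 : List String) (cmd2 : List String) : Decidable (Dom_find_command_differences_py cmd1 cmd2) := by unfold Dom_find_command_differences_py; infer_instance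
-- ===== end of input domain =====

-- B replaces A's length branch plus three index-range loops by a sentinel-padded
-- co-iteration of both lists (hand-rolled zip_longest) with one classifying pass,
-- with no list indexing or range() at all (alternative).

-- Shared helpers: Python's repr() for strings (exact on the ASCII domain) and the message builders.
def pyReprChar (q : Char) (c : Char) : List Char :=
  if c = '\\' then ['\\','\\']
  else if c = q then ['\\', q]
  else if c = '\t' then ['\\','t']
  else if c = '\n' then ['\\','n']
  else if c = '\r' then ['\\','r']
  else [c]

def pyRepr (s : String) : String :=
  let cs := s.toList
  let q : Char := if cs.contains '\'' && !(cs.contains '"') then '"' else '\''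
  String.ofList ([q] ++ cs.flatMap (pyReprChar q) ++ [q])

def msgLen (n1 n2 : Int) : String :=
  "Length: " ++ PySem.Int.toStr n1 ++ " != " ++ PySem.Int.toStr n2

def msgNe (i : Int) (a b : String) : String :=
  "Argument " ++ PySem.Int.toStr i ++ ": " ++ pyRepr a ++ " != " ++ pyRepr b

def msgExtra (i : Int) (a : String) : String :=
  "Argument " ++ PySem.Int.toStr i ++ ": " ++ pyRepr a ++ " (extra in actual)"

def msgMissing (i : Int) (a : String) : String :=
  "Argument " ++ PySem.Int.toStr i ++ ": " ++ pyRepr a ++ " (missing from actual)"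

-- ===== PORT A =====
def find_command_differences_py (cmd1 : List String) (cmd2 : List String) : List String :=
  let n1 : Int := cmd1.length
  let n2 : Int := cmd2.length
  if n1 ≠ n2 then
    let differences : List String := [msgLen n1 n2]
    let minLen : Int := min n1 n2
    let differences :=
      (PySem.List.pyRange 0 minLen 1).foldl (fun acc i =>
        if PySem.List.pyGetD cmd1 i "" ≠ PySem.List.pyGetD cmd2 i "" then
          acc ++ [msgNe i (PySem.List.pyGetD cmd1 i "") (PySem.List.pyGetD cmd2 i "")]
        else acc) differences
    if n1 > n2 then
      (PySem.List.pyRange n2 n1 1).foldl (fun acc i =>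
        acc ++ [msgExtra i (PySem.List.pyGetD cmd1 i "")]) differences
    else
      (PySem.List.pyRange n1 n2 1).foldl (fun acc i =>
        acc ++ [msgMissing i (PySem.List.pyGetD cmd2 i "")]) differences
  else
    (PySem.List.pyRange 0 n1 1).foldl (fun acc i =>
      if PySem.List.pyGetD cmd1 i "" ≠ PySem.List.pyGetD cmd2 i "" then
        acc ++ [msgNe i (PySem.List.pyGetD cmd1 i "") (PySem.List.pyGetD cmd2 i "")]
      else acc) []

-- ===== PORT B =====
-- Source B's pad_pairs generator: co-consume both iterators, padding the exhausted side
-- (the _PAD sentinel becomes 'none'); stops when both are exhausted.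
def fcdPairs : List String → List String → List (Option String × Option String)
  | x :: xs, y :: ys => (some x, some y) :: fcdPairs xs ys
  | x :: xs, [] => (some x, none) :: fcdPairs xs []
  | [], y :: ys => (none, some y) :: fcdPairs [] ys
  | [], [] => []

-- Source B's loop body, branches in Python's order ('b is _PAD' / 'a is _PAD' / 'a != b');
-- (none, none) is never produced by fcdPairs (the generator returns instead of yielding it).
def fcdClassify (p : Int × (Option String × Option String)) : List String :=
  match p.2 with
  | (some a, none) => [msgExtra p.1 a]
  | (none, some b) => [msgMissing p.1 b]
  | (some a, some b) => if a ≠ b then [msgNe p.1 a b] else []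
  | (none, none) => []

def find_command_differences_py_alt (cmd1 : List String) (cmd2 : List String) : List String :=
  let diffs : List String :=
    if (cmd1.length : Int) ≠ (cmd2.length : Int) then
      [msgLen (cmd1.length : Int) (cmd2.length : Int)] else []
  (PySem.List.enumerate (fcdPairs cmd1 cmd2) 0).foldl
    (fun acc p => acc ++ fcdClassify p) diffs

-- ===== PRECONDITION & SPEC =====
def Spec_find_command_differences_py (cmd1 : List String) (cmd2 : List String) (out : List String) : Prop := out = find_command_differences_py_alt cmd1 cmd2
instance (cmd1 : List String) (cmd2 : List String) (out : List String) : Decidable (Spec_find_command_differences_py cmd1 cmd2 out) := by unfold Spec_find_command_differences_py; infer_instance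

-- ===== CLAIM =====
def Claim_equal_find_command_differences_py : Prop := ∀ (cmd1 : List String) (cmd2 : List String), Dom_find_command_differences_py cmd1 cmd2 → Spec_find_command_differences_py cmd1 cmd2 (find_command_differences_py cmd1 cmd2)

-- ===== LEMMAS AND PROOFS =====

-- Turn a conditional-append foldl ('if p(i): out.append(e(i))') into acc ++ flatMap.
theorem foldl_ite_append_eq_flatMap {α β : Type} (p : α → Prop) [DecidablePred p]
    (e : α → β) (l : List α) (acc : List β) :
    l.foldl (fun acc i => if p i then acc ++ [e i] else acc) acc
      = acc ++ l.flatMap (fun i => if p i then [e i] else []) := by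
  induction l generalizing acc with
  | nil => simp
  | cons x xs ih =>
    simp only [List.foldl_cons, List.flatMap_cons]
    split_ifs <;> simp [ih, List.append_assoc]

theorem flatMap_congr_mem {α β : Type} {l : List α} {f g : α → List β}
    (h : ∀ x ∈ l, f x = g x) : l.flatMap f = l.flatMap g := by
  induction l with
  | nil => rfl
  | cons x xs ih =>
    simp only [List.flatMap_cons, h x (List.mem_cons_self), ih (fun y hy => h y (List.mem_cons_of_mem _ hy))]

-- A's index-range map over a suffix equals a map over the enumerated dropped suffix.
theorem map_range_eq_map_enumerate_drop {β : Type} (g : Int → String → β) :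
    ∀ (xs : List String) (a : Int), 0 ≤ a →
    (PySem.List.pyRange a (xs.length : Int) 1).map (fun j => g j (PySem.List.pyGetD xs j "")) =
    (PySem.List.enumerate (xs.drop a.toNat) a).map (fun p => g p.1 p.2) := by
  intro xs
  suffices h : ∀ (n : Nat) (a : Int), 0 ≤ a → xs.length - a.toNat = n →
      (PySem.List.pyRange a (xs.length : Int) 1).map (fun j => g j (PySem.List.pyGetD xs j "")) =
      (PySem.List.enumerate (xs.drop a.toNat) a).map (fun p => g p.1 p.2) by
    intro a ha; exact h _ a ha rfl
  intro n
  induction n with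
  | zero =>
    intro a ha hn
    have hge : (xs.length : Int) ≤ a := by omega
    rw [PySem.List.pyRange_one_eq_nil hge, List.drop_eq_nil_of_le (by omega)]
    simp [PySem.List.enumerate]
  | succ n ih =>
    intro a ha hn
    have hlt : a < (xs.length : Int) := by omega
    have hlt' : a.toNat < xs.length := by omega
    rw [PySem.List.pyRange_one_cons hlt, List.drop_eq_getElem_cons hlt']
    rw [List.map_cons, PySem.List.enumerate_cons, List.map_cons]
    have hget : PySem.List.pyGetD xs a "" = xs[a.toNat] :=
      PySem.List.pyGetD_eq_getElem xs "" ha hlt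
    rw [hget]
    have hdrop : xs.drop (a.toNat + 1) = xs.drop (a + 1).toNat := by
      congr 1; omega
    rw [hdrop, ih (a + 1) (by omega) (by omega)]

-- Classified one-sided remainders are maps over the enumerated remainder.
theorem fcdPairs_nil_right : ∀ (xs : List String) (i : Int),
    (PySem.List.enumerate (fcdPairs xs []) i).flatMap fcdClassify
      = (PySem.List.enumerate xs i).map (fun p => msgExtra p.1 p.2) := by
  intro xs
  induction xs with
  | nil => intro i; simp [fcdPairs, PySem.List.enumerate]
  | cons x xs ih =>
    intro i
    rw [fcdPairs, PySem.List.enumerate_cons, PySem.List.enumerate_cons]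
    simp [fcdClassify, ih]

theorem fcdPairs_nil_left : ∀ (ys : List String) (i : Int),
    (PySem.List.enumerate (fcdPairs [] ys) i).flatMap fcdClassify
      = (PySem.List.enumerate ys i).map (fun p => msgMissing p.1 p.2) := by
  intro ys
  induction ys with
  | nil => intro i; simp [fcdPairs, PySem.List.enumerate]
  | cons y ys ih =>
    intro i
    rw [fcdPairs, PySem.List.enumerate_cons, PySem.List.enumerate_cons]
    simp [fcdClassify, ih]

-- Characterisation of the classified pair stream: mismatches on the zipped prefix,
-- then the one-sided tail.
theorem fcdPairs_eq : ∀ (xs ys : List String) (i : Int),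
    (PySem.List.enumerate (fcdPairs xs ys) i).flatMap fcdClassify =
      (PySem.List.enumerate (xs.zip ys) i).flatMap
        (fun p => if p.2.1 ≠ p.2.2 then [msgNe p.1 p.2.1 p.2.2] else [])
      ++ (if ys.length < xs.length
          then (PySem.List.enumerate (xs.drop ys.length) (i + (ys.length : Int))).map
                 (fun p => msgExtra p.1 p.2)
          else (PySem.List.enumerate (ys.drop xs.length) (i + (xs.length : Int))).map
                 (fun p => msgMissing p.1 p.2)) := by
  intro xs
  induction xs with
  | nil =>
    intro ys i
    rw [fcdPairs_nil_left]
    simp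
  | cons x xs ih =>
    intro ys i
    cases ys with
    | nil =>
      rw [fcdPairs_nil_right]
      simp
    | cons y ys =>
      rw [fcdPairs, PySem.List.enumerate_cons, List.flatMap_cons]
      have hlen1 : i + ((ys.length + 1 : Nat) : Int) = (i + 1) + (ys.length : Int) := by
        push_cast; ring
      have hlen2 : i + ((xs.length + 1 : Nat) : Int) = (i + 1) + (xs.length : Int) := by
        push_cast; ring
      simp only [List.zip_cons_cons, PySem.List.enumerate_cons, List.flatMap_cons,
        List.drop_succ_cons, List.length_cons, Nat.add_lt_add_iff_right, hlen1, hlen2]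
      rw [ih ys (i + 1)]
      simp only [fcdClassify]
      split_ifs with h <;> simp

-- The zipped flatMap form of A's mismatch loop.
theorem flatMap_range_min_eq_flatMap_enumerate_zip (cmd1 cmd2 : List String) :
    (PySem.List.pyRange 0 (min (cmd1.length : Int) (cmd2.length : Int)) 1).flatMap
      (fun j => if PySem.List.pyGetD cmd1 j "" ≠ PySem.List.pyGetD cmd2 j "" then
            [msgNe j (PySem.List.pyGetD cmd1 j "") (PySem.List.pyGetD cmd2 j "")] else [])
    = (PySem.List.enumerate (cmd1.zip cmd2) 0).flatMap
        (fun p => if p.2.1 ≠ p.2.2 then [msgNe p.1 p.2.1 p.2.2] else []) := by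
  rw [PySem.List.enumerate_eq_map_pyRange (d := ("", "")), List.flatMap_map]
  have hlen : ((cmd1.zip cmd2).length : Int) = min (cmd1.length : Int) (cmd2.length : Int) := by
    rw [List.length_zip]; push_cast; rfl
  rw [PySem.List.len_eq, hlen]
  refine flatMap_congr_mem (fun j hj => ?_)
  rw [PySem.List.mem_pyRange_one] at hj
  have hj1 : j < (cmd1.length : Int) := by omega
  have hj2 : j < (cmd2.length : Int) := by omega
  have hz : j < ((cmd1.zip cmd2).length : Int) := by rw [hlen]; omega
  rw [PySem.List.pyGetD_eq_getElem _ _ hj.1 hz,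
      PySem.List.pyGetD_eq_getElem _ _ hj.1 hj1,
      PySem.List.pyGetD_eq_getElem _ _ hj.1 hj2]
  simp [List.getElem_zip]

theorem find_command_differences_py_spec : Claim_equal_find_command_differences_py := by
  intro cmd1 cmd2 _
  unfold Spec_find_command_differences_py find_command_differences_py find_command_differences_py_alt
  simp only []
  conv_rhs => rw [PySem.List.foldl_append_eq_flatMap]
  rw [fcdPairs_eq]
  by_cases hne : (cmd1.length : Int) = (cmd2.length : Int)
  · rw [if_neg (by omega : ¬ (cmd1.length : Int) ≠ (cmd2.length : Int)),
        if_neg (by omega : ¬ (cmd1.length : Int) ≠ (cmd2.length : Int))]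
    have hlen : cmd1.length = cmd2.length := by omega
    rw [foldl_ite_append_eq_flatMap, List.nil_append]
    have hmin : (cmd1.length : Int) = min (cmd1.length : Int) (cmd2.length : Int) := by omega
    rw [hmin, flatMap_range_min_eq_flatMap_enumerate_zip]
    rw [if_neg (by omega : ¬ cmd2.length < cmd1.length), hlen]
    simp
  · rw [if_pos hne, if_pos hne]
    rw [foldl_ite_append_eq_flatMap, flatMap_range_min_eq_flatMap_enumerate_zip]
    by_cases hgt : (cmd1.length : Int) > (cmd2.length : Int)
    · rw [if_pos hgt, if_pos (by omega : cmd2.length < cmd1.length)]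
      rw [PySem.List.foldl_append_singleton_eq_map,
          map_range_eq_map_enumerate_drop _ cmd1 (cmd2.length : Int) (by omega)]
      simp
    · rw [if_neg hgt, if_neg (by omega : ¬ cmd2.length < cmd1.length)]
      rw [PySem.List.foldl_append_singleton_eq_map,
          map_range_eq_map_enumerate_drop _ cmd2 (cmd1.length : Int) (by omega)]
      simp
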